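-- pv_equiv track=rewrite | github.com/Enjef/Algo | 2300 - 2399/2380 - Time Needed to Rearrange a Binary String/2380 - Time Needed to Rearrange a Binary String.py | secondsToRemoveOccurrences
-- ===== SOURCE A (Python) =====
-- def secondsToRemoveOccurrences(s: str) -> int:
--     req = prefix = prev = 0
--     for i, c in enumerate(s):
--         if c == '1':
--             req = max(prev, i-prefix)
--             prefix += 1
--             if req:
--                 prev = req + 1
--     return req
-- ===== SOURCE B (Python) =====
-- def secondsToRemoveOccurrences(s: str) -> int:
--     # Closed-form: the answer is the maximum, over '1's with at least one
--     # non-'1' char before them, of (chars_before_it_that_are_not_1) plus the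
--     # number of '1's after it; computed as max(zeros - ones) + total_ones.
--     zeros = 0
--     ones = 0
--     best = None
--     for c in s:
--         if c == '1':
--             ones += 1
--             if zeros > 0:
--                 v = zeros - ones
--                 if best is None or v > best:
--                     best = v
--         else:
--             zeros += 1
--     return 0 if best is None else best + ones
-- ===== Notes on version B (the rewrite author's own statement) =====
-- stated objective: alternative
-- what changed: Replaces A's coupled req/prev recurrence (req = max(prev, i-prefix), prev = req+1) with a closed-form single maximum: answer = max over qualifying '1's of (zeros-ones) plus the final count of '1's, tracked as one running max with no inter-step feedback.
import Mathlib
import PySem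

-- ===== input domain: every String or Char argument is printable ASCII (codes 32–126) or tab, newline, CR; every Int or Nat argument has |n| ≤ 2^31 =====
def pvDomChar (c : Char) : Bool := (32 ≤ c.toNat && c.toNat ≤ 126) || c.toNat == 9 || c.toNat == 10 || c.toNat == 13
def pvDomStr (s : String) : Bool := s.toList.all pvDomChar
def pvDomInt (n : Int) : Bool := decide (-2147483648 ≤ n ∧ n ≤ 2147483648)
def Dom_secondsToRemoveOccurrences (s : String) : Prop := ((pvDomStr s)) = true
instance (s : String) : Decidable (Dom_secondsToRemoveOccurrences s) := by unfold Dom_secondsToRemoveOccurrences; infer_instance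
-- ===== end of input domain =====

-- B replaces A's coupled req/prev recurrence by a closed-form single maximum (max(zeros-ones)+total ones); alternative formulation, same O(n) cost.

-- ===== PORT A =====
-- loop body of A's `for i, c in enumerate(s)` (state = (req, prefix, prev))
def stepA (st : Int × Int × Int) (p : Int × Char) : Int × Int × Int :=
  if p.2 = '1' then
    let req := max st.2.2 (p.1 - st.2.1)
    if req ≠ 0 then (req, st.2.1 + 1, req + 1) else (req, st.2.1 + 1, st.2.2)
  else st

def secondsToRemoveOccurrences (s : String) : Int :=
  ((PySem.List.enumerate s.toList 0).foldl stepA (0, 0, 0)).1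

-- ===== PORT B =====
-- loop body of B's `for c in s` (state = (zeros, ones, best))
def stepB (st : Int × Int × Option Int) (c : Char) : Int × Int × Option Int :=
  if c = '1' then
    if st.1 > 0 then
      let v := st.1 - (st.2.1 + 1)
      match st.2.2 with
      | none => (st.1, st.2.1 + 1, some v)
      | some b => if v > b then (st.1, st.2.1 + 1, some v) else (st.1, st.2.1 + 1, some b)
    else (st.1, st.2.1 + 1, st.2.2)
  else (st.1 + 1, st.2.1, st.2.2)

def secondsToRemoveOccurrences_alt (s : String) : Int :=
  let st := s.toList.foldl stepB (0, 0, none)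
  match st.2.2 with
  | none => 0
  | some b => b + st.2.1

-- ===== PRECONDITION & SPEC =====
def Spec_secondsToRemoveOccurrences (s : String) (out : Int) : Prop := out = secondsToRemoveOccurrences_alt s
instance (s : String) (out : Int) : Decidable (Spec_secondsToRemoveOccurrences s out) := by unfold Spec_secondsToRemoveOccurrences; infer_instance

-- ===== CLAIM (what is proved, stated in full; the proofs are below) =====
def Claim_equal_secondsToRemoveOccurrences : Prop := ∀ (s : String), Dom_secondsToRemoveOccurrences s → Spec_secondsToRemoveOccurrences s (secondsToRemoveOccurrences s)

-- ===== LEMMAS AND PROOFS =====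

-- Relation between A's loop state (req, prefix, prev) and B's (zeros, ones, best)
-- after both have consumed the same prefix of the string, i being A's next index.
def pvInv (i : Int) (a : Int × Int × Int) (b : Int × Int × Option Int) : Prop :=
  i = b.1 + b.2.1 ∧ a.2.1 = b.2.1 ∧ 0 ≤ b.1 ∧ 0 ≤ b.2.1 ∧
  (match b.2.2 with
   | none => a.1 = 0 ∧ a.2.2 = 0
   | some v => a.1 = v + b.2.1 ∧ a.2.2 = v + b.2.1 + 1 ∧ 1 ≤ b.1 ∧ 1 ≤ v + b.2.1)

lemma pvInv_step (i : Int) (c : Char) (a : Int × Int × Int) (b : Int × Int × Option Int)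
    (h : pvInv i a b) : pvInv (i + 1) (stepA a (i, c)) (stepB b c) := by
  obtain ⟨req, pre, prev⟩ := a
  obtain ⟨z, k, best⟩ := b
  unfold pvInv stepA stepB at *
  by_cases hc : c = '1' <;> simp only [hc, if_true, if_false] <;>
    cases best <;> simp_all [max_def] <;> (try split_ifs) <;> (try simp_all) <;> omega

lemma pvInv_foldl : ∀ (l : List Char) (i : Int) (a : Int × Int × Int) (b : Int × Int × Option Int),
    pvInv i a b →
    pvInv (i + l.length) ((PySem.List.enumerate l i).foldl stepA a) (l.foldl stepB b) := by
  intro l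
  induction l with
  | nil => intro i a b h; simpa [PySem.List.enumerate_nil] using h
  | cons c t ih =>
      intro i a b h
      rw [PySem.List.enumerate_cons]
      simp only [List.foldl_cons, List.length_cons]
      have h2 := ih (i + 1) (stepA a (i, c)) (stepB b c) (pvInv_step i c a b h)
      have : i + 1 + (t.length : Int) = i + ((t.length : Int) + 1) := by ring
      rwa [this] at h2

-- ===== VERDICT (by name: the statement is the Claim_ definition above) =====
theorem secondsToRemoveOccurrences_spec : Claim_equal_secondsToRemoveOccurrences := by
  intro s _
  unfold Spec_secondsToRemoveOccurrences secondsToRemoveOccurrences secondsToRemoveOccurrences_alt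
  have h0 : pvInv 0 ((0, 0, 0) : Int × Int × Int) ((0, 0, none) : Int × Int × Option Int) := by
    unfold pvInv; simp
  have h := pvInv_foldl s.toList 0 (0, 0, 0) (0, 0, none) h0
  set A := (PySem.List.enumerate s.toList 0).foldl stepA (0, 0, 0)
  set B := s.toList.foldl stepB (0, 0, none)
  unfold pvInv at h
  obtain ⟨-, -, -, -, h5⟩ := h
  show A.1 = (match B.2.2 with | none => 0 | some b => b + B.2.1)
  cases hb : B.2.2 with
  | none =>
      rw [hb] at h5
      simpa using (h5 : A.1 = 0 ∧ A.2.2 = 0).1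
  | some v =>
      rw [hb] at h5
      simpa using (h5 : A.1 = v + B.2.1 ∧ A.2.2 = v + B.2.1 + 1 ∧ 1 ≤ B.1 ∧ 1 ≤ v + B.2.1).1
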